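-- pv_equiv track=rewrite | github.com/maxkim77/Codingtest | 프로그래머스/unrated/120956. 옹알이 （1）/옹알이 （1）.py | solution
-- ===== SOURCE A (Python) =====
-- from itertools import permutations
--
-- def solution(babbling):
--     answer = 0
--     pronounce = ["aya", "ye", "woo", "ma"]
--     for i in range(1, len(pronounce)+1):
--         for word in babbling:
--             if word in map(lambda x: ''.join(x), permutations(pronounce, i)):
--                 answer += 1
--     return answer
-- ===== SOURCE B (Python) =====
-- def solution(babbling):
--     tokens = ("aya", "ye", "woo", "ma")
--     count = 0
--     for word in babbling:
--         used = []
--         rest = word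
--         ok = True
--         while rest and ok:
--             for t in tokens:
--                 if rest.startswith(t) and t not in used:
--                     used.append(t)
--                     rest = rest[len(t):]
--                     break
--             else:
--                 ok = False
--         if ok and used:
--             count += 1
--     return count
-- ===== Notes on version B (the rewrite author's own statement) =====
-- stated objective: faster
-- what changed: B greedily tokenizes each word left-to-right (the four tokens start with distinct letters), accepting iff the word is fully consumed by distinct tokens, instead of A's enumeration of all 1..4-permutations of the tokens with a membership scan per word.
import Mathlib
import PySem

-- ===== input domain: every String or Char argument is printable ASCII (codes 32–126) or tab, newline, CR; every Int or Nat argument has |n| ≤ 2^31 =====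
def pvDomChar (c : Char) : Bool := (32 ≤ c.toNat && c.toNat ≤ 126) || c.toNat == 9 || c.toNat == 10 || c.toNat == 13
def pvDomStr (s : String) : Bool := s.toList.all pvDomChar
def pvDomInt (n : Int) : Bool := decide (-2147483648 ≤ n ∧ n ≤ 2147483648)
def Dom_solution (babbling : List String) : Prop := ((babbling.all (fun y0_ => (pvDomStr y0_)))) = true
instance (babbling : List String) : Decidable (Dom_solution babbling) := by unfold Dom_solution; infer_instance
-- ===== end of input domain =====

-- B replaces A's enumeration of all permutations of the four pronounceable tokens by a single greedy
-- left-to-right tokenization of each word (the tokens start with distinct letters), counting a word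
-- iff it is fully consumed by distinct tokens.

-- ===== PORT A =====
def solution (babbling : List String) : Int :=
  let pronounce : List String := ["aya", "ye", "woo", "ma"]
  (PySem.List.pyRange 1 ((pronounce.length : Int) + 1) 1).foldl
    (fun answer i =>
      babbling.foldl
        (fun answer word =>
          if word ∈ (PySem.List.permutations pronounce i.toNat).map (fun x => PySem.Str.join "" x)
          then answer + 1 else answer)
        answer)
    0

-- ===== PORT B =====
def pvTokens : List String := ["aya", "ye", "woo", "ma"]

-- Source B's while loop over one word; fuel = |rest| suffices since every consumed token is nonempty
def pvMunch : Nat → List String → List Char → Bool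
  | _, used, [] => !used.isEmpty
  | 0, _, _ => false
  | fuel+1, used, rest =>
    match pvTokens.find? (fun t => PySem.Chars.startswith rest t.toList && !(used.contains t)) with
    | some t => pvMunch fuel (used ++ [t]) (rest.drop t.toList.length)
    | none => false

def solution_alt (babbling : List String) : Int :=
  babbling.foldl
    (fun count word => if pvMunch word.toList.length [] word.toList then count + 1 else count) 0

-- ===== PRECONDITION & SPEC =====
def Spec_solution (babbling : List String) (out : Int) : Prop := out = solution_alt babbling
instance (babbling : List String) (out : Int) : Decidable (Spec_solution babbling out) := by unfold Spec_solution; infer_instance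

-- ===== CLAIM (what is proved, stated in full; the proofs are below) =====
def Claim_equal_solution : Prop := ∀ (babbling : List String), Dom_solution babbling → Spec_solution babbling (solution babbling)

-- ===== LEMMAS AND PROOFS =====

-- the list of words A accepts at permutation size i
def pvS (i : Nat) : List String :=
  (PySem.List.permutations pvTokens i).map (fun x => PySem.Str.join "" x)

-- joining with the empty separator is flattening
lemma pv_join_nil_flatten (l : List (List Char)) : PySem.Chars.join [] l = l.flatten := by
  induction l with
  | nil => simp [PySem.Chars.join_nil]
  | cons a t ih =>
    cases t with
    | nil => simp [PySem.Chars.join_singleton]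
    | cons b r => rw [PySem.Chars.join_cons_cons] at *; simp [ih]

-- completeness of PySem.List.permutations: every duplicate-free selection occurs
lemma pv_perms_complete : ∀ (L xs : List String), L.Nodup → L ⊆ xs →
    L ∈ PySem.List.permutations xs L.length := by
  intro L
  induction L with
  | nil => intro xs _ _; rw [PySem.List.permutations.eq_def]; simp
  | cons x L ih =>
    intro xs hnd hsub
    have hx : x ∈ xs := hsub (List.mem_cons_self)
    rw [List.length_cons, PySem.List.permutations.eq_def]
    simp only [List.mem_flatMap, List.mem_range]
    refine ⟨xs.idxOf x, List.idxOf_lt_length_of_mem hx, ?_⟩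
    rw [List.getElem?_idxOf hx]
    simp only [List.mem_map]
    refine ⟨L, ?_, rfl⟩
    rw [List.eraseIdx_idxOf_eq_erase]
    refine ih (xs.erase x) (List.nodup_cons.mp hnd).2 (fun t ht => ?_)
    have hne : t ≠ x := fun he => (List.nodup_cons.mp hnd).1 (by rw [he] at ht; exact ht)
    exact (List.mem_erase_of_ne hne).mpr (hsub (List.mem_cons_of_mem _ ht))

-- a successful run of B's loop exhibits a duplicate-free tokenization of the remaining input
lemma pv_munch_sound : ∀ (fuel : Nat) (rest : List Char) (used : List String),
    used ⊆ pvTokens → used.Nodup → pvMunch fuel used rest = true →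
    ∃ L : List String, L ⊆ pvTokens ∧ (used ++ L).Nodup ∧ used ++ L ≠ [] ∧
      (L.map String.toList).flatten = rest := by
  intro fuel
  induction fuel with
  | zero =>
    intro rest used hsub hnd h
    cases rest with
    | nil =>
      refine ⟨[], by simp, by simpa using hnd, ?_, rfl⟩
      simp only [pvMunch, Bool.not_eq_eq_eq_not, Bool.not_true] at h
      simpa [List.isEmpty_iff] using h
    | cons c cs => simp [pvMunch] at h
  | succ fuel ih =>
    intro rest used hsub hnd h
    cases rest with
    | nil =>
      refine ⟨[], by simp, by simpa using hnd, ?_, rfl⟩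
      simp only [pvMunch, Bool.not_eq_eq_eq_not, Bool.not_true] at h
      simpa [List.isEmpty_iff] using h
    | cons c cs =>
      rw [pvMunch] at h
      rcases hf : pvTokens.find? (fun t => PySem.Chars.startswith (c :: cs) t.toList && !(used.contains t)) with _ | t
      · rw [hf] at h; simp at h
      · rw [hf] at h
        have htmem : t ∈ pvTokens := List.mem_of_find?_eq_some hf
        have hpred := List.find?_some hf
        simp only [Bool.and_eq_true, Bool.not_eq_eq_eq_not, Bool.not_true,
          PySem.Chars.startswith_iff] at hpred
        obtain ⟨hpre, hnot⟩ := hpred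
        have hnot' : t ∉ used := by simpa using hnot
        obtain ⟨s, hs⟩ := hpre
        have hnd' : (used ++ [t]).Nodup := by
          refine List.Nodup.append hnd (by simp) ?_
          intro a ha hb
          rw [List.mem_singleton] at hb
          exact hnot' (hb ▸ ha)
        obtain ⟨L', hsub', hnd2, hne2, hfl⟩ := ih (List.drop t.toList.length (c :: cs)) (used ++ [t])
          (by intro z hz; rcases List.mem_append.mp hz with hz | hz
              · exact hsub hz
              · simpa using (List.mem_singleton.mp hz) ▸ htmem) hnd' h
        refine ⟨t :: L', ?_, ?_, by simp, ?_⟩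
        · intro z hz; rcases List.mem_cons.mp hz with rfl | hz
          · exact htmem
          · exact hsub' hz
        · have : used ++ t :: L' = (used ++ [t]) ++ L' := by simp
          rw [this]; exact hnd2
        · rw [← hs, List.drop_left] at hfl
          simp [hfl, ← hs]
      · simp

-- a word B accepts is a joined i-permutation of the tokens for some i ∈ 1..4
lemma pv_mem_S_of_munch (w : String) (h : pvMunch w.toList.length [] w.toList = true) :
    ∃ k ∈ [1, 2, 3, 4], w ∈ pvS k := by
  obtain ⟨L, hsub, hnd, hne, hfl⟩ := pv_munch_sound w.toList.length w.toList []
    (by simp) (by simp) h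
  simp only [List.nil_append] at hnd hne
  have hlen4 : L.length ≤ 4 := (List.Nodup.subperm hnd hsub).length_le
  have hlen1 : 1 ≤ L.length := List.length_pos_iff.mpr hne
  have hw : w = PySem.Str.join "" L := by
    apply String.toList_inj.mp
    rw [PySem.Str.toList_join, show ("" : String).toList = [] from rfl, pv_join_nil_flatten, hfl]
  refine ⟨L.length, by interval_cases h : L.length <;> simp, ?_⟩
  rw [hw]
  exact List.mem_map_of_mem (pv_perms_complete L pvTokens hnd hsub)

-- B accepts every joined i-permutation of the tokens (finite check)
lemma pv_munch_of_mem_S : ∀ k ∈ [1, 2, 3, 4], ∀ w ∈ pvS k,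
    pvMunch w.toList.length [] w.toList = true := by decide

-- the four permutation-join lists are pairwise disjoint (finite check)
lemma pv_disj : ∀ i ∈ [1, 2, 3, 4], ∀ j ∈ [1, 2, 3, 4], i ≠ j → ∀ w ∈ pvS i, w ∉ pvS j := by
  decide

-- per word: A's four membership tests contribute exactly B's 0/1 verdict
lemma pv_perWord (w : String) :
    ((if w ∈ pvS 1 then 1 else 0) + (if w ∈ pvS 2 then 1 else 0) +
      (if w ∈ pvS 3 then 1 else 0) + (if w ∈ pvS 4 then 1 else 0) : Nat)
      = (if pvMunch w.toList.length [] w.toList = true then 1 else 0) := by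
  by_cases hm : pvMunch w.toList.length [] w.toList = true
  · obtain ⟨k, hk, hw⟩ := pv_mem_S_of_munch w hm
    fin_cases hk <;>
      simp_all [pv_disj 1 (by simp) 2 (by simp) (by simp) w,
        pv_disj 1 (by simp) 3 (by simp) (by simp) w, pv_disj 1 (by simp) 4 (by simp) (by simp) w,
        pv_disj 2 (by simp) 1 (by simp) (by simp) w, pv_disj 2 (by simp) 3 (by simp) (by simp) w,
        pv_disj 2 (by simp) 4 (by simp) (by simp) w, pv_disj 3 (by simp) 1 (by simp) (by simp) w,
        pv_disj 3 (by simp) 2 (by simp) (by simp) w, pv_disj 3 (by simp) 4 (by simp) (by simp) w,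
        pv_disj 4 (by simp) 1 (by simp) (by simp) w, pv_disj 4 (by simp) 2 (by simp) (by simp) w,
        pv_disj 4 (by simp) 3 (by simp) (by simp) w]
  · have h1 : w ∉ pvS 1 := fun h => hm (pv_munch_of_mem_S 1 (by simp) w h)
    have h2 : w ∉ pvS 2 := fun h => hm (pv_munch_of_mem_S 2 (by simp) w h)
    have h3 : w ∉ pvS 3 := fun h => hm (pv_munch_of_mem_S 3 (by simp) w h)
    have h4 : w ∉ pvS 4 := fun h => hm (pv_munch_of_mem_S 4 (by simp) w h)
    have hm' : pvMunch w.toList.length [] w.toList = false := by simpa using hm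
    simp only [String.length_toList] at hm'
    simp [h1, h2, h3, h4, hm']

lemma pv_countSum (l : List String) :
    l.countP (fun w => decide (w ∈ pvS 1)) + l.countP (fun w => decide (w ∈ pvS 2)) +
      l.countP (fun w => decide (w ∈ pvS 3)) + l.countP (fun w => decide (w ∈ pvS 4))
      = l.countP (fun w => pvMunch w.toList.length [] w.toList) := by
  induction l with
  | nil => simp
  | cons w l ih =>
    simp only [List.countP_cons, decide_eq_true_eq]
    have h := pv_perWord w
    omega

-- ===== VERDICT (by name: the statement is the Claim_ definition above) =====
theorem solution_spec : Claim_equal_solution := by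
  intro babbling _
  show solution babbling = solution_alt babbling
  have e1 : PySem.List.pyRange 1 (((["aya", "ye", "woo", "ma"] : List String).length : Int) + 1) 1
      = [1, 2, 3, 4] := by decide
  simp only [solution, solution_alt, e1, List.foldl_cons, List.foldl_nil]
  rw [show ((1 : Int).toNat) = 1 from rfl, show ((2 : Int).toNat) = 2 from rfl,
    show ((3 : Int).toNat) = 3 from rfl, show ((4 : Int).toNat) = 4 from rfl]
  have ep : ∀ i : Nat, List.map (fun x => PySem.Str.join "" x)
      (PySem.List.permutations (["aya", "ye", "woo", "ma"] : List String) i) = pvS i := fun i => rfl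
  rw [ep 1, ep 2, ep 3, ep 4]
  rw [PySem.List.foldl_ite_add_one (fun w => w ∈ pvS 1) babbling 0,
    PySem.List.foldl_ite_add_one (fun w => w ∈ pvS 2) babbling _,
    PySem.List.foldl_ite_add_one (fun w => w ∈ pvS 3) babbling _,
    PySem.List.foldl_ite_add_one (fun w => w ∈ pvS 4) babbling _,
    PySem.List.foldl_if_add_one (fun w => pvMunch w.toList.length [] w.toList) babbling 0]
  have h := pv_countSum babbling
  push_cast [← h]
  ring
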